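-- pv_equiv track=rewrite | github.com/VaibhubCodes/CSS | voice_assistant/pr.py | detect_file_open_intent
-- ===== SOURCE A (Python) =====
-- def detect_file_open_intent(query):
--     """
--     Detect if the user's query indicates intent to open a file.
--     Returns True if file opening intent is detected.
--     """
--     query_lower = query.lower()
--     open_keywords = ["open", "show", "display", "view", "see", "get", "access", "link", "open up", "pull up"]
--     file_keywords = ["file", "document", "pdf", "docx", "image", "picture", "photo", "spreadsheet", "presentation"]
--
--     # Check for common patterns
--     # Pattern 1: "open/show/etc. [the/my/etc.] file"
--     for open_word in open_keywords:
--         for file_word in file_keywords: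
--             patterns = [
--                 f"{open_word} {file_word}",
--                 f"{open_word} the {file_word}",
--                 f"{open_word} my {file_word}",
--                 f"{open_word} that {file_word}",
--                 f"{open_word} this {file_word}",
--             ]
--             if any(pattern in query_lower for pattern in patterns):
--                 return True
--
--     # Pattern 2: Direct references to "this" or "that"
--     reference_patterns = [
--         "open this", "show this", "display this", "view this",
--         "open that", "show that", "display that", "view that",
--         "open it", "show it", "display it", "view it"
--     ]
--     if any(pattern in query_lower for pattern in reference_patterns):
--         return True
--
--     # Pattern 3: "can you open/show/etc."
--     for open_word in open_keywords:
--         prefixes = ["can you ", "could you ", "would you ", "please ", "i want to ", "i'd like to "]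
--         for prefix in prefixes:
--             if f"{prefix}{open_word}" in query_lower:
--                 return True
--
--     return False
-- ===== SOURCE B (Python) =====
-- # B: one flat precomputed trigger list (connector list + verb x object product), bucketed by
-- # first character, searched by a single left-to-right position scan with startswith tests.
-- _OPEN = ["open", "show", "display", "view", "see", "get", "access", "link", "open up", "pull up"]
-- _FILE = ["file", "document", "pdf", "docx", "image", "picture", "photo", "spreadsheet", "presentation"]
-- _CONN = ["", "the ", "my ", "that ", "this "]
-- _PREFIXES = ["can you ", "could you ", "would you ", "please ", "i want to ", "i'd like to "]
--
-- _PATTERNS = (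
--     [f"{ow} {c}{fw}" for ow in _OPEN for fw in _FILE for c in _CONN]
--     + [f"{v} {r}" for r in ["this", "that", "it"] for v in ["open", "show", "display", "view"]]
--     + [p + ow for ow in _OPEN for p in _PREFIXES]
-- )
-- _BUCKETS = {}
-- for _p in _PATTERNS:
--     _BUCKETS.setdefault(_p[0], []).append(_p)
--
-- def detect_file_open_intent(query):
--     q = query.lower()
--     for i, ch in enumerate(q):
--         for p in _BUCKETS.get(ch, ()):
--             if q.startswith(p, i):
--                 return True
--     return False
-- ===== Notes on version B (the rewrite author's own statement) =====
-- stated objective: alternative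
-- what changed: B precomputes one flat trigger-substring list (built from a connector list and a verb-by-object product instead of A's three hand-written phases), groups it into buckets keyed by first character, and decides intent by a single left-to-right scan over query positions testing startswith against the current character's bucket, replacing A's nested loops of per-pattern substring searches with early returns.
import Mathlib
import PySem

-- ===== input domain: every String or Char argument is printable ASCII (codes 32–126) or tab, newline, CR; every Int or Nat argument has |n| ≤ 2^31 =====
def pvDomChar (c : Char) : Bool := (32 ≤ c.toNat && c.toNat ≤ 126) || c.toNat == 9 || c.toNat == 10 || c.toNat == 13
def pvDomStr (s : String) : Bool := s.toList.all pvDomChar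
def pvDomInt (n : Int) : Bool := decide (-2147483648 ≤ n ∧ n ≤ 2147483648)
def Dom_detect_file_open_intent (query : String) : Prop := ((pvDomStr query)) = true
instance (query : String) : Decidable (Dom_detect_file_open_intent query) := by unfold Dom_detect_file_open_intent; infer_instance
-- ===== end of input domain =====

-- B precomputes one flat trigger-substring list (connector list + verb×object product), groups it
-- into buckets keyed by first character, and decides by a single left-to-right position scan testing
-- prefixes against the current character's bucket, instead of A's three phases of nested per-pattern
-- substring searches with early returns. Same result on every input.

-- ===== PORT A =====
-- literal transliteration of A: three phases with early return; 'p in s' is PySem.Str.isIn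
def detect_file_open_intent (query : String) : Bool :=
  let ql := PySem.Str.lower query
  let openKeywords : List String := ["open", "show", "display", "view", "see", "get", "access", "link", "open up", "pull up"]
  let fileKeywords : List String := ["file", "document", "pdf", "docx", "image", "picture", "photo", "spreadsheet", "presentation"]
  -- Pattern 1: for-loops with 'return True' = List.any
  if openKeywords.any (fun ow => fileKeywords.any (fun fw =>
      [(ow ++ " ") ++ fw, (ow ++ " the ") ++ fw, (ow ++ " my ") ++ fw,
       (ow ++ " that ") ++ fw, (ow ++ " this ") ++ fw].any (fun p => PySem.Str.isIn p ql))) then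
    true
  else
    -- Pattern 2: direct references
    let referencePatterns : List String :=
      ["open this", "show this", "display this", "view this",
       "open that", "show that", "display that", "view that",
       "open it", "show it", "display it", "view it"]
    if referencePatterns.any (fun p => PySem.Str.isIn p ql) then
      true
    else
      -- Pattern 3: "can you open/show/etc."
      if openKeywords.any (fun ow =>
          ["can you ", "could you ", "would you ", "please ", "i want to ", "i'd like to "].any
            (fun prefix_ => PySem.Str.isIn (prefix_ ++ ow) ql)) then
        true
      else
        false

-- ===== PORT B =====
-- Source B's module-level pattern list, built from a connector list and a verb×object product
def pvOpen : List String := ["open", "show", "display", "view", "see", "get", "access", "link", "open up", "pull up"]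
def pvFile : List String := ["file", "document", "pdf", "docx", "image", "picture", "photo", "spreadsheet", "presentation"]
def pvConn : List String := ["", "the ", "my ", "that ", "this "]
def pvPrefixes : List String := ["can you ", "could you ", "would you ", "please ", "i want to ", "i'd like to "]

def pvPatterns : List String :=
  (pvOpen.flatMap fun ow => pvFile.flatMap fun fw => pvConn.map fun c => ((ow ++ " ") ++ c) ++ fw)
  ++ (["this", "that", "it"].flatMap fun r => ["open", "show", "display", "view"].map fun v => (v ++ " ") ++ r)
  ++ (pvOpen.flatMap fun ow => pvPrefixes.map fun p => p ++ ow)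

-- Source B: for _p in _PATTERNS: _BUCKETS.setdefault(_p[0], []).append(_p)  — setdefault+append is
-- Dict.modify; _p[0] is ported as headD (exact: every pattern is non-empty)
def pvBuckets : PySem.Dict Char (List String) :=
  pvPatterns.foldl (fun d p => d.modify (p.toList.headD ' ') [] (· ++ [p])) PySem.Dict.empty

-- Source B's 'for i, ch in enumerate(q): for p in _BUCKETS.get(ch, ()): if q.startswith(p, i) …'
-- as structural recursion over the suffixes of the char list (one step per position i)
def pvScan (d : PySem.Dict Char (List String)) : List Char → Bool
  | [] => false
  | c :: rest => ((d.getD c []).any fun p => p.toList.isPrefixOf (c :: rest)) || pvScan d rest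

def detect_file_open_intent_alt (query : String) : Bool :=
  pvScan pvBuckets (PySem.Str.lower query).toList

-- ===== PRECONDITION & SPEC =====
def Spec_detect_file_open_intent (query : String) (out : Bool) : Prop := out = detect_file_open_intent_alt query
instance (query : String) (out : Bool) : Decidable (Spec_detect_file_open_intent query out) := by unfold Spec_detect_file_open_intent; infer_instance

-- ===== CLAIM (what is proved, stated in full; the proofs are below) =====
def Claim_equal_detect_file_open_intent : Prop := ∀ (query : String), Dom_detect_file_open_intent query → Spec_detect_file_open_intent query (detect_file_open_intent query)

-- ===== LEMMAS AND PROOFS =====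

-- every pattern is non-empty (each chunk appends a non-empty literal piece)
theorem pvPatterns_ne_nil : ∀ p ∈ pvPatterns, p.toList ≠ [] := by
  intro p hp
  simp only [pvPatterns, List.mem_append, List.mem_flatMap, List.mem_map] at hp
  rcases hp with ((⟨ow, _, fw, _, c, _, rfl⟩ | ⟨r, _, v, _, rfl⟩) | ⟨ow, how, pre, hpre, rfl⟩)
  · simp [String.toList_append, List.append_eq_nil_iff]
  · simp [String.toList_append, List.append_eq_nil_iff]
  · fin_cases how <;> simp [String.toList_append, List.append_eq_nil_iff]

-- the bucket for c holds exactly the patterns whose first char is c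
theorem pvBuckets_getD (c : Char) :
    pvBuckets.getD c [] = pvPatterns.filter (fun p => p.toList.headD ' ' == c) := by
  unfold pvBuckets
  have hfold : pvPatterns.foldl (fun d p => d.modify (p.toList.headD ' ') [] (· ++ [p])) PySem.Dict.empty
      = (pvPatterns.map fun p => (p.toList.headD ' ', p)).foldl
          (fun d q => d.modify q.1 [] (· ++ [q.2])) PySem.Dict.empty := by
    rw [List.foldl_map]
  rw [hfold, PySem.Dict.getD_foldl_modify_append, PySem.Dict.getD_empty, List.nil_append,
    List.filter_map, List.map_map]
  simp [Function.comp_def]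

-- scanning the bucket of the first char sees every pattern that could match here
theorem pvBucket_any_eq (c : Char) (s : List Char) :
    ((pvBuckets.getD c []).any fun p => p.toList.isPrefixOf (c :: s)) =
    (pvPatterns.any fun p => p.toList.isPrefixOf (c :: s)) := by
  rw [pvBuckets_getD, Bool.eq_iff_iff]
  simp only [List.any_eq_true, List.mem_filter]
  constructor
  · rintro ⟨p, ⟨hp, _⟩, hpre⟩; exact ⟨p, hp, hpre⟩
  · rintro ⟨p, hp, hpre⟩
    refine ⟨p, ⟨hp, ?_⟩, hpre⟩
    cases hl : p.toList with
    | nil => exact absurd hl (pvPatterns_ne_nil p hp)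
    | cons a t =>
      rw [hl] at hpre
      rw [List.isPrefixOf_iff_prefix, List.cons_prefix_cons] at hpre
      simp [hpre.1]

-- the position scan finds a pattern iff that pattern is an infix (visits every suffix)
theorem pvScan_true_iff (s : List Char) :
    pvScan pvBuckets s = true ↔ ∃ p ∈ pvPatterns, p.toList <:+: s := by
  induction s with
  | nil =>
    simp only [pvScan, Bool.false_eq_true, false_iff]
    rintro ⟨p, hp, hinf⟩
    exact pvPatterns_ne_nil p hp (List.infix_nil.mp hinf)
  | cons c rest ih =>
    simp only [pvScan, pvBucket_any_eq, Bool.or_eq_true, List.any_eq_true,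
      List.isPrefixOf_iff_prefix, ih, List.infix_cons_iff]
    aesop

-- hence the scan equals 'some pattern is a substring' (A's primitive, via Chars.isIn_iff_infix)
theorem pvScan_eq_any_isIn (s : List Char) :
    pvScan pvBuckets s = pvPatterns.any (fun p => PySem.Chars.isIn p.toList s) := by
  rw [Bool.eq_iff_iff, pvScan_true_iff]
  simp [List.any_eq_true, PySem.Chars.isIn_iff_infix]

-- B's connector decomposition generates exactly A's five pattern-1 strings per (ow, fw)
theorem pvConn_map_eq (ow fw : String) :
    (pvConn.map fun c => ((ow ++ " ") ++ c) ++ fw) =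
    [(ow ++ " ") ++ fw, (ow ++ " the ") ++ fw, (ow ++ " my ") ++ fw,
     (ow ++ " that ") ++ fw, (ow ++ " this ") ++ fw] := by
  simp [pvConn, String.append_assoc]
  and_intros <;> rw [← String.append_assoc] <;> rfl

-- B's verb×object product generates exactly A's reference pattern list
theorem pvRefs_eq :
    (["this", "that", "it"].flatMap fun r => ["open", "show", "display", "view"].map fun v => (v ++ " ") ++ r) =
    ["open this", "show this", "display this", "view this",
     "open that", "show that", "display that", "view that",
     "open it", "show it", "display it", "view it"] := by decide

-- ===== VERDICT (by name: the statement is the Claim_ definition above) =====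
set_option maxHeartbeats 1000000 in
theorem detect_file_open_intent_spec : Claim_equal_detect_file_open_intent := by
  intro query _
  show detect_file_open_intent query = detect_file_open_intent_alt query
  unfold detect_file_open_intent_alt
  rw [pvScan_eq_any_isIn]
  unfold pvPatterns
  simp only [pvConn_map_eq, pvRefs_eq, List.any_append, List.any_flatMap, List.any_map,
    Function.comp_def, pvOpen, pvFile, pvPrefixes]
  simp only [detect_file_open_intent, PySem.Str.isIn_eq]
  split_ifs with h1 h2 h3
  · simp only [h1, Bool.true_or]
  · simp only [Bool.not_eq_true] at h1
    simp only [h1, h2, Bool.false_or, Bool.true_or]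
  · simp only [Bool.not_eq_true] at h1 h2
    simp only [h1, h2, h3, Bool.false_or]
  · simp only [Bool.not_eq_true] at h1 h2 h3
    simp only [h1, h2, h3, Bool.or_self]
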